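-- pv_equiv track=rewrite | github.com/gregorygui/scripting | CTF/decoder.py | lendian
-- ===== SOURCE A (Python) =====
-- def lendian(s):
--     res = list()
--     i = 0
--     t = list()
--     while i < len(s):
--         if (i % 4) or (i == 0):
--             t.append(s[i])
--         else:
--             res.append(''.join(t[::-1]))
--             t = [s[i]]
--         i += 1
--     while (i % 4):
--         t.append("\x00")
--         i += 1
--     res.append(''.join(t[::-1]))
--     return ''.join(res)
-- ===== SOURCE B (Python) =====
-- def lendian(s):
--     out = []
--     while s:
--         c = s[:4]
--         s = s[4:]
--         out.append((c + "\x00" * (4 - len(c)))[::-1])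
--     return ''.join(out)
-- ===== Notes on version B (the rewrite author's own statement) =====
-- stated objective: simpler
-- what changed: A's per-character index loop with a running buffer, a modular-counter flush and a separate NUL-padding while-loop is replaced by one slice-and-consume loop that takes 4-char chunks, pads the short final chunk, reverses and joins.
import Mathlib
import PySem

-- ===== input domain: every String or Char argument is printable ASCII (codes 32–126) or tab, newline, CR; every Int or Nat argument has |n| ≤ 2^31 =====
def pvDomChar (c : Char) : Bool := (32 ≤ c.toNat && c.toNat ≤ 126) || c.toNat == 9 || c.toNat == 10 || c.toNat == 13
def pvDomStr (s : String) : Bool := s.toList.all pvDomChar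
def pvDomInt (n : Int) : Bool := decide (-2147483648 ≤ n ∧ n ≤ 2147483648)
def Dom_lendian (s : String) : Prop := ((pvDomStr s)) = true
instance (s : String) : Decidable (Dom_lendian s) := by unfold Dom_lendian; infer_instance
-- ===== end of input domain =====

-- B replaces A's per-character index loop (running buffer + modular-counter flush) by a
-- slice-and-consume loop over 4-char chunks; objective: simpler, same O(n) cost.

-- ===== PORT A =====
-- first while loop of A: state (i, res, t); `rest` is the unread suffix of s, so the loop
-- condition `i < len(s)` is `rest ≠ []` and `s[i]` is the head of rest (i counts consumed chars)
def lendianLoop (rest : List Char) (i : Nat) (res : List (List Char)) (t : List Char) :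
    List (List Char) × List Char × Nat :=
  match rest with
  | [] => (res, t, i)
  | c :: rs =>
      if i % 4 ≠ 0 ∨ i = 0 then
        lendianLoop rs (i + 1) res (t ++ [c])
      else
        lendianLoop rs (i + 1) (res ++ [t.reverse]) [c]

-- second while loop of A: pad t with NULs while i % 4 ≠ 0
def padLoop (i : Nat) (t : List Char) : List Char × Nat :=
  if i % 4 ≠ 0 then padLoop (i + 1) (t ++ ['\x00']) else (t, i)
termination_by (4 - i % 4) % 4
decreasing_by omega

def lendian (s : String) : String :=
  let r := lendianLoop s.toList 0 [] []
  let p := padLoop r.2.2 r.2.1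
  String.mk ((r.1 ++ [p.1.reverse]).flatten)

-- ===== PORT B =====
-- Source B: while s: c = s[:4]; s = s[4:]; out.append((c + "\x00"*(4-len(c)))[::-1]); join.
-- s[:4] / s[4:] with nonnegative bounds are exactly List.take / List.drop.
def lendianAltLoop (l : List Char) (out : List (List Char)) : List (List Char) :=
  match l with
  | [] => out
  | c :: rs =>
      lendianAltLoop ((c :: rs).drop 4)
        (out ++ [((c :: rs).take 4 ++ List.replicate (4 - ((c :: rs).take 4).length) '\x00').reverse])
termination_by l.length
decreasing_by simp

def lendian_alt (s : String) : String :=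
  String.mk (lendianAltLoop s.toList []).flatten

-- ===== PRECONDITION & SPEC =====
def Spec_lendian (s : String) (out : String) : Prop := out = lendian_alt s
instance (s : String) (out : String) : Decidable (Spec_lendian s out) := by unfold Spec_lendian; infer_instance

-- ===== CLAIM (what is proved, stated in full; the proofs are below) =====
def Claim_equal_lendian : Prop := ∀ (s : String), Dom_lendian s → Spec_lendian s (lendian s)

-- ===== LEMMAS AND PROOFS =====

theorem altLoop_acc (n : Nat) : ∀ (l : List Char), l.length = n →
    ∀ (out : List (List Char)), lendianAltLoop l out = out ++ lendianAltLoop l [] := by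
  induction n using Nat.strong_induction_on with
  | _ n ih =>
    intro l hl out
    match l with
    | [] => simp [lendianAltLoop]
    | c :: rs =>
        rw [lendianAltLoop, lendianAltLoop]
        have h4 : ((c :: rs).drop 4).length < n := by
          have := hl; simp at this ⊢; omega
        have e := ih ((c :: rs).drop 4).length h4 ((c :: rs).drop 4) rfl
        rw [e (out ++ [((c :: rs).take 4 ++ List.replicate (4 - ((c :: rs).take 4).length) '\x00').reverse]),
            e ([] ++ [((c :: rs).take 4 ++ List.replicate (4 - ((c :: rs).take 4).length) '\x00').reverse])]
        simp

theorem padLoop_eq (k : Nat) : ∀ (i : Nat) (t : List Char), (4 - i % 4) % 4 = k →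
    padLoop i t = (t ++ List.replicate k '\x00', i + k) := by
  induction k with
  | zero => intro i t h; rw [padLoop]; simp; omega
  | succ k ih =>
      intro i t h
      rw [padLoop, if_pos (by omega)]
      rw [ih (i + 1) (t ++ ['\x00']) (by omega)]
      simp [List.replicate_succ]
      omega

theorem padLoop_char (i : Nat) (t : List Char) :
    padLoop i t = (t ++ List.replicate ((4 - i % 4) % 4) '\x00', i + (4 - i % 4) % 4) :=
  padLoop_eq _ i t rfl

theorem main_lemma (n : Nat) : ∀ (l : List Char) (i : Nat) (res : List (List Char)) (t : List Char),
    l.length = n → i % 4 = 0 → (i = 0 → t = []) →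
    ((lendianLoop l i res t).1 ++
      [(padLoop (lendianLoop l i res t).2.2 (lendianLoop l i res t).2.1).1.reverse]).flatten
      = res.flatten ++ t.reverse ++ (lendianAltLoop l []).flatten := by
  induction n using Nat.strong_induction_on with
  | _ n ih =>
  intro l i res t hl hi ht
  match l with
  | [] =>
      rw [lendianLoop]
      simp [padLoop_char, lendianAltLoop, show (4 - i % 4) % 4 = 0 from by omega]
  | c :: rs =>
      have key : ∀ res₁ : List (List Char), res₁.flatten = res.flatten ++ t.reverse →
          ((lendianLoop rs (i+1) res₁ [c]).1 ++
            [(padLoop (lendianLoop rs (i+1) res₁ [c]).2.2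
              (lendianLoop rs (i+1) res₁ [c]).2.1).1.reverse]).flatten
            = res.flatten ++ t.reverse ++ (lendianAltLoop (c :: rs) []).flatten := by
        intro res₁ h1
        match rs with
        | [] =>
            rw [lendianLoop]
            simp [padLoop_char, lendianAltLoop, show (4 - (i+1) % 4) % 4 = 3 from by omega, h1]
        | [c2] =>
            rw [lendianLoop, if_pos (Or.inl (by omega)), lendianLoop]
            simp [padLoop_char, lendianAltLoop, show (4 - (i+2) % 4) % 4 = 2 from by omega, h1]
        | [c2, c3] =>
            rw [lendianLoop, if_pos (Or.inl (by omega)), lendianLoop, if_pos (Or.inl (by omega)),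
                lendianLoop]
            simp [padLoop_char, lendianAltLoop, show (4 - (i+3) % 4) % 4 = 1 from by omega, h1]
        | c2 :: c3 :: c4 :: rs' =>
            rw [lendianLoop, if_pos (Or.inl (by omega)), lendianLoop, if_pos (Or.inl (by omega)),
                lendianLoop, if_pos (Or.inl (by omega))]
            have hn : rs'.length < n := by simp at hl; omega
            have hIH := ih rs'.length hn rs' (i+4) res₁ ([c] ++ [c2] ++ [c3] ++ [c4])
              rfl (by omega) (by omega)
            rw [show i + 1 + 1 + 1 + 1 = i + 4 from by omega, hIH]
            rw [lendianAltLoop,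
              altLoop_acc ((c :: c2 :: c3 :: c4 :: rs').drop 4).length _ rfl]
            simp [h1]
      by_cases hi0 : i = 0
      · subst hi0
        rw [ht rfl, lendianLoop, if_pos (Or.inr rfl)]
        have := key res (by rw [ht rfl]; simp)
        simpa [ht rfl] using this
      · rw [lendianLoop, if_neg (by omega)]
        exact key (res ++ [t.reverse]) (by simp)

-- ===== VERDICT (by name: the statement is the Claim_ definition above) =====
theorem lendian_spec : Claim_equal_lendian := by
  intro s _
  unfold Spec_lendian lendian lendian_alt
  apply congrArg String.mk
  simpa using main_lemma s.toList.length s.toList 0 [] [] rfl rfl (fun _ => rfl)
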